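-- pv_equiv track=rewrite | github.com/beenujb/.py | multiple.py | isMultipleOf13
-- ===== SOURCE A (Python) =====
-- def isMultipleOf13(n):
--
--     odd_count = 0
--     even_count = 0
--
--     # Make no positive if +n is multiple of 3
--     # then is -n. We are doing this to avoid
--     # stack overflow in recursion
--     if(n < 0):
--         n = -n
--     if(n == 0):
--         return 1
--     if(n == 1):
--         return 0
--
--     while(n):
--
--         # If odd bit is set then
--         # increment odd counter
--         if(n & 1):
--             odd_count += 1
--         n = n >> 1
--
--         # If even bit is set then
--         # increment even counter
--         if(n & 1):
--             even_count += 1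
--         n = n >> 1
--
--     return isMultipleOf13(abs(odd_count - even_count))
-- ===== SOURCE B (Python) =====
-- def isMultipleOf13(n):
--     # Iterative version: repeatedly replace n by |(#set bits at even positions) - (#set bits at odd positions)|,
--     # computed from the binary string, until n is 0 or 1.
--     n = abs(n)
--     while n > 1:
--         s = 0
--         for i, b in enumerate(reversed(bin(n)[2:])):
--             if b == '1':
--                 s += 1 if i % 2 == 0 else -1
--         n = abs(s)
--     return 1 if n == 0 else 0
-- ===== Notes on version B (the rewrite author's own statement) =====
-- stated objective: simpler
-- what changed: Replaces A's self-recursion with an explicit while loop and replaces A's two-bits-per-iteration shift/mask counting loop (two separate counters, then a difference) with a single signed pass over the binary digit string of n that accumulates plus or minus one per set bit by index parity.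
import Mathlib
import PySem

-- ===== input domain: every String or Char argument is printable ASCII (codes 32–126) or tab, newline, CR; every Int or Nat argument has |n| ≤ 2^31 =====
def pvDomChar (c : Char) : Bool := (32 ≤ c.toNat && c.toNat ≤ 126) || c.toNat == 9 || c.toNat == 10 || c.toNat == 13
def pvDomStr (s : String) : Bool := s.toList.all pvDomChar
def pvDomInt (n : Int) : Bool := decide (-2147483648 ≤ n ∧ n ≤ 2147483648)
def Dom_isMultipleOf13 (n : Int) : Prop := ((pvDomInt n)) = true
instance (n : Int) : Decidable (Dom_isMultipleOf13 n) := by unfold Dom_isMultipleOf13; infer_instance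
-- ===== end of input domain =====

-- B replaces A's self-recursion by an explicit while-loop and computes the signed
-- bit-position sum in one pass over the binary digit list (objective: simpler/iterative).

-- ===== PORT A =====
-- A's inner `while(n)` loop: consumes two bits per iteration, counting set bits at
-- even positions into oc and at odd positions into ec (n is nonnegative here, so Nat is
-- exact; `n & 1` = n % 2 and `n >> 1` = n / 2 for nonnegative n).
def bitsLoop (n oc ec : Nat) : Nat × Nat :=
  if n = 0 then (oc, ec)
  else
    bitsLoop (n / 2 / 2) (if n % 2 = 1 then oc + 1 else oc)
      (if n / 2 % 2 = 1 then ec + 1 else ec)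
termination_by n
decreasing_by omega

-- A's outer self-recursion (its argument is always nonnegative: abs(odd_count - even_count)).
-- `fuel` is only a structural totality guard: each recursive argument is < n
-- (bitsLoop_diff + termB_lt below), so fuel = n + 1 always suffices and the
-- 0-fuel branch is unreachable.
def goA : Nat → Nat → Int
  | 0, _ => 0
  | fuel + 1, n =>
    if n = 0 then 1
    else if n = 1 then 0
    else goA fuel ((((bitsLoop n 0 0).1 : Int) - ((bitsLoop n 0 0).2 : Int)).natAbs)

def isMultipleOf13 (n : Int) : Int :=
  -- `if n < 0: n = -n` makes n = |n|; represented exactly by natAbs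
  goA (n.natAbs + 1) n.natAbs

-- ===== PORT B =====
-- the list of binary digits of n, least-significant first, as Booleans
-- (this is reversed(bin(n)[2:]) with '1' ↦ true)
def toBits (n : Nat) : List Bool := if n = 0 then [] else (n % 2 == 1) :: toBits (n / 2)
termination_by n
decreasing_by omega

-- `for i, b in enumerate(reversed(bin(n)[2:])): if b == '1': s += 1 if i % 2 == 0 else -1`
def signedSum (l : List Bool) : Int :=
  (PySem.List.enumerate l 0).foldl
    (fun s p => if p.2 then (if p.1 % 2 = 0 then s + 1 else s - 1) else s) 0

-- B's while-loop (n is nonnegative after `n = abs(n)`); same fuel guard as goA: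
-- the loop value strictly decreases (termB_lt below), so fuel = n + 1 suffices.
def goB : Nat → Nat → Int
  | 0, _ => 0
  | fuel + 1, n =>
    if 1 < n then goB fuel (signedSum (toBits n)).natAbs
    else if n = 0 then 1 else 0

def isMultipleOf13_alt (n : Int) : Int :=
  -- n = abs(n); represented exactly by natAbs
  goB (n.natAbs + 1) n.natAbs

-- ===== PRECONDITION & SPEC =====
def Spec_isMultipleOf13 (n : Int) (out : Int) : Prop := out = isMultipleOf13_alt n
instance (n : Int) (out : Int) : Decidable (Spec_isMultipleOf13 n out) := by unfold Spec_isMultipleOf13; infer_instance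

-- ===== CLAIM (what is proved, stated in full; the proofs are below) =====
def Claim_equal_isMultipleOf13 : Prop := ∀ (n : Int), Dom_isMultipleOf13 n → Spec_isMultipleOf13 n (isMultipleOf13 n)

-- ===== LEMMAS AND PROOFS =====
-- alternating sum of a bit list: +1 for a set bit at an even index, -1 at an odd index
def pvAlt : List Bool → Int
  | [] => 0
  | b :: l => (if b then 1 else 0) - pvAlt l

theorem toBits_zero : toBits 0 = [] := by rw [toBits]; simp

theorem count_toBits_lt : ∀ n : Nat, 2 ≤ n → (toBits n).count true < n := by
  intro n
  induction n using toBits.induct with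
  | case1 => omega
  | case2 n hne ih =>
    intro h2
    rw [toBits, if_neg hne]
    have hcount : ((n % 2 == 1) :: toBits (n / 2)).count true
        = (toBits (n / 2)).count true + (if n % 2 = 1 then 1 else 0) := by
      by_cases h1 : n % 2 = 1 <;> simp [h1]
    rw [hcount]
    by_cases hq : 2 ≤ n / 2
    · have := ih hq
      by_cases h1 : n % 2 = 1 <;> simp [h1] <;> omega
    · have hq1 : n / 2 = 1 := by omega
      have t1 : toBits 1 = [true] := by rw [toBits]; simp [toBits_zero]
      rw [hq1, t1]
      by_cases h1 : n % 2 = 1 <;> simp [h1] <;> omega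

theorem natAbs_pvAlt_le : ∀ l : List Bool, (pvAlt l).natAbs ≤ l.count true := by
  intro l
  induction l with
  | nil => simp [pvAlt]
  | cons b l ih =>
    cases b <;> simp [pvAlt] <;> omega

theorem pvAlt_toBits_two_step (n : Nat) (hne : n ≠ 0) :
    pvAlt (toBits n) = (if n % 2 = 1 then (1 : Int) else 0)
      - (if n / 2 % 2 = 1 then (1 : Int) else 0) + pvAlt (toBits (n / 2 / 2)) := by
  rw [toBits, if_neg hne]
  by_cases hz : n / 2 = 0
  · have hz2 : n / 2 / 2 = 0 := by omega
    rw [hz2, hz, toBits_zero]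
    by_cases h1 : n % 2 = 1 <;> simp [pvAlt, h1]
  · rw [toBits, if_neg hz]
    by_cases h1 : n % 2 = 1 <;> by_cases h2 : n / 2 % 2 = 1 <;>
      simp [pvAlt, h1, h2] <;> ring

theorem bitsLoop_diff : ∀ (n oc ec : Nat),
    (((bitsLoop n oc ec).1 : Int) - ((bitsLoop n oc ec).2 : Int))
      = (oc : Int) - (ec : Int) + pvAlt (toBits n) := by
  intro n oc ec
  induction n, oc, ec using bitsLoop.induct with
  | case1 oc ec => simp [bitsLoop, toBits_zero, pvAlt]
  | case2 n oc ec hne ih =>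
    simp only [dite_eq_ite] at ih
    rw [bitsLoop, if_neg hne, ih, pvAlt_toBits_two_step n hne]
    split_ifs <;> push_cast <;> omega

theorem signedSum_shift : ∀ (l : List Bool) (k s : Int),
    (PySem.List.enumerate l k).foldl
      (fun s p => if p.2 then (if p.1 % 2 = 0 then s + 1 else s - 1) else s) s
      = s + (if k % 2 = 0 then pvAlt l else -pvAlt l) := by
  intro l
  induction l with
  | nil => intro k s; simp [PySem.List.enumerate_nil, pvAlt]
  | cons b l ih =>
    intro k s
    rw [PySem.List.enumerate_cons, List.foldl_cons, ih]
    by_cases hk0 : k % 2 = 0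
    · have hk1 : ¬ ((k + 1) % 2 = 0) := by omega
      cases b <;> simp [pvAlt, hk0, hk1] <;> ring
    · have hk1 : (k + 1) % 2 = 0 := by omega
      cases b <;> simp [pvAlt, hk0, hk1] <;> ring

theorem signedSum_eq_pvAlt (l : List Bool) : signedSum l = pvAlt l := by
  rw [signedSum, signedSum_shift]
  norm_num

theorem termB_lt (n : Nat) (h : 2 ≤ n) : (signedSum (toBits n)).natAbs < n := by
  rw [signedSum_eq_pvAlt]
  have h1 := natAbs_pvAlt_le (toBits n)
  have h2 := count_toBits_lt n h
  omega

theorem goA_eq_goB : ∀ (fuel n : Nat), n < fuel → goA fuel n = goB fuel n := by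
  intro fuel
  induction fuel with
  | zero => intro n h; omega
  | succ fuel ih =>
    intro n h
    by_cases h0 : n = 0
    · subst h0; simp [goA, goB]
    · by_cases h1 : n = 1
      · subst h1; simp [goA, goB]
      · have h2 : 2 ≤ n := by omega
        rw [goA, goB, if_neg h0, if_neg h1, if_pos (by omega : 1 < n)]
        have harg : (((bitsLoop n 0 0).1 : Int) - ((bitsLoop n 0 0).2 : Int)).natAbs
            = (signedSum (toBits n)).natAbs := by
          rw [bitsLoop_diff, signedSum_eq_pvAlt]
          norm_num
        rw [harg]
        exact ih _ (by have := termB_lt n h2; omega)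

-- ===== VERDICT (by name: the statement is the Claim_ definition above) =====
theorem isMultipleOf13_spec : Claim_equal_isMultipleOf13 := by
  intro n _
  unfold Spec_isMultipleOf13 isMultipleOf13 isMultipleOf13_alt
  exact goA_eq_goB (n.natAbs + 1) n.natAbs (Nat.lt_succ_self _)
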